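-- pv_equiv track=rewrite | github.com/TestDLst/test | encoders/encoder.py | double_url_encode
-- ===== SOURCE A (Python) =====
-- import string
--
-- def double_url_encode(payload):
--     retVal = payload
--
--     if payload:
--         retVal = ""
--         i = 0
--
--         while i < len(payload):
--             if payload[i] == '%' and (i < len(payload) - 2) and payload[
--                                                                 i + 1:i + 2] in string.hexdigits and payload[
--                                                                                                      i + 2:i + 3] in string.hexdigits:
--                 retVal += '%%25%s' % payload[i + 1:i + 3]
--                 i += 3
--             else:
--                 retVal += '%%25%.2X' % ord(payload[i])
--                 i += 1
--
--     return retVal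
-- ===== SOURCE B (Python) =====
-- HEX_DIGITS = set("0123456789abcdefABCDEF")
--
-- def _enc(s):
--     # plain double-encoding of every character of s
--     return ''.join('%%25%.2X' % ord(c) for c in s)
--
-- def double_url_encode(payload):
--     if not payload:
--         return payload
--     # split on '%': each later piece was preceded by one '%' in the input
--     parts = payload.split('%')
--     pieces = [_enc(parts[0])]
--     for p in parts[1:]:
--         if len(p) >= 2 and p[0] in HEX_DIGITS and p[1] in HEX_DIGITS:
--             pieces.append('%25' + p[:2] + _enc(p[2:]))
--         else:
--             pieces.append('%2525' + _enc(p))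
--     return ''.join(pieces)
-- ===== Notes on version B (the rewrite author's own statement) =====
-- stated objective: faster
-- what changed: Replaces A's index-stepping while-loop (with manual two-character lookahead and repeated string concatenation) by a single split of the payload on the percent character and a join of per-piece encodings: a piece starting with two hexdigits keeps them as an encoded triple, everything else is byte-encoded.
import Mathlib
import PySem

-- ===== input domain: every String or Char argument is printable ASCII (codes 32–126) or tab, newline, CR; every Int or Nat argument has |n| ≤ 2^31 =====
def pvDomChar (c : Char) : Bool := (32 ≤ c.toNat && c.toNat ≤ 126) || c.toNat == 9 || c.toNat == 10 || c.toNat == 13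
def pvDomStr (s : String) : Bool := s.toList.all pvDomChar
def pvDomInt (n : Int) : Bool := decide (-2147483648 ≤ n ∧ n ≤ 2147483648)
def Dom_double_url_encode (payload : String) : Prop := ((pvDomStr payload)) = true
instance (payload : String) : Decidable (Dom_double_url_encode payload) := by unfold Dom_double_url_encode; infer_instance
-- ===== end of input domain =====

-- B replaces A's index-stepping while-loop with split-on-'%' and per-piece encoding (objective: simpler); same return value.

-- '%.2X' % n — exact for 0 ≤ n < 256, which covers every character admitted by Dom (codes ≤ 126)
def pvHexDigit (n : Nat) : Char := if n < 10 then Char.ofNat (48 + n) else Char.ofNat (55 + n)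
def pvHex2 (n : Nat) : List Char := [pvHexDigit (n / 16), pvHexDigit (n % 16)]

-- ===== PORT A =====
-- string.hexdigits
def pvHexdigits : List Char := "0123456789abcdefABCDEF".toList

-- A's while-loop: index i stepping by 1 or 3, accumulating retVal
def pvALoop (s : List Char) (i : Nat) (ret : List Char) : List Char :=
  if h : i < s.length then
    if (PySem.List.pyGet? s (i : Int) == some '%') &&
       decide ((i : Int) < (s.length : Int) - 2) &&
       PySem.Chars.isIn (PySem.List.slice s (some ((i : Int) + 1)) (some ((i : Int) + 2))) pvHexdigits &&
       PySem.Chars.isIn (PySem.List.slice s (some ((i : Int) + 2)) (some ((i : Int) + 3))) pvHexdigits then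
      pvALoop s (i + 3) (ret ++ ['%', '2', '5'] ++ PySem.List.slice s (some ((i : Int) + 1)) (some ((i : Int) + 3)))
    else
      pvALoop s (i + 1) (ret ++ ['%', '2', '5'] ++ pvHex2 (s[i].toNat))
  else ret
termination_by s.length - i

def double_url_encode (payload : String) : String :=
  if payload.toList = [] then payload
  else String.ofList (pvALoop payload.toList 0 [])

-- ===== PORT B =====
-- HEX_DIGITS = set("0123456789abcdefABCDEF")
def pvHexSet : List Char := PySem.Set.ofList "0123456789abcdefABCDEF".toList

-- _enc: ''.join('%%25%.2X' % ord(c) for c in s)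
def pvEnc (s : List Char) : List Char := s.flatMap (fun c => '%' :: '2' :: '5' :: pvHex2 c.toNat)

-- one piece of the loop body (p[0]/p[1] read with getD, guarded by the length test, as Python's `and` guards them)
def pvPiece (p : List Char) : List Char :=
  if decide (2 ≤ p.length) && pvHexSet.contains (p.getD 0 ' ') && pvHexSet.contains (p.getD 1 ' ') then
    '%' :: '2' :: '5' :: (p.take 2 ++ pvEnc (p.drop 2))
  else
    '%' :: '2' :: '5' :: '2' :: '5' :: pvEnc p

def double_url_encode_alt (payload : String) : String :=
  if payload.toList = [] then payload
  else
    let parts := payload.toList.splitOn '%'   -- payload.split('%'); single-char sep: List.splitOn is exact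
    String.ofList (pvEnc parts.headI ++ (parts.tail.map pvPiece).flatten)

-- ===== PRECONDITION & SPEC =====
def Spec_double_url_encode (payload : String) (out : String) : Prop := out = double_url_encode_alt payload
instance (payload : String) (out : String) : Decidable (Spec_double_url_encode payload out) := by unfold Spec_double_url_encode; infer_instance

-- ===== CLAIM (what is proved, stated in full; the proofs are below) =====
def Claim_equal_double_url_encode : Prop := ∀ (payload : String), Dom_double_url_encode payload → Spec_double_url_encode payload (double_url_encode payload)

-- ===== LEMMAS AND PROOFS =====

-- common reference function: one left-to-right pass with the %XY lookahead
def pvG : List Char → List Char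
  | [] => []
  | c :: rest =>
    if (c == '%') && decide (2 ≤ rest.length) && pvHexSet.contains (rest.getD 0 ' ') && pvHexSet.contains (rest.getD 1 ' ') then
      '%' :: '2' :: '5' :: (rest.take 2 ++ pvG (rest.drop 2))
    else
      '%' :: '2' :: '5' :: (pvHex2 c.toNat ++ pvG rest)
termination_by l => l.length
decreasing_by all_goals (simp; try omega)

theorem pvHexSet_eq : pvHexSet = pvHexdigits := by decide

theorem pvIsIn_singleton (c : Char) :
    PySem.Chars.isIn [c] pvHexdigits = pvHexSet.contains c := by
  rw [pvHexSet_eq, List.contains_eq_mem]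
  apply Bool.coe_iff_coe.mp
  rw [PySem.Chars.isIn_iff_infix, List.singleton_infix_iff]
  simp

set_option maxRecDepth 16384 in
theorem pvA_eq_G (s : List Char) (i : Nat) (ret : List Char) :
    pvALoop s i ret = ret ++ pvG (s.drop i) := by
  have main : ∀ (n i : Nat) (ret : List Char), s.length ≤ i + n →
      pvALoop s i ret = ret ++ pvG (s.drop i) := by
    intro n
    induction n with
    | zero =>
      intro i ret h
      rw [pvALoop, dif_neg (by omega), List.drop_eq_nil_of_le (by omega), pvG]
      simp
    | succ n ih =>
      intro i ret h
      rw [pvALoop]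
      by_cases hi : i < s.length
      · rw [dif_pos hi, List.drop_eq_getElem_cons hi, pvG]
        have hget : PySem.List.pyGet? s (i : Int) = some s[i] := by
          rw [PySem.List.pyGet?_natCast]; exact List.getElem?_eq_getElem hi
        by_cases hpc : s[i] = '%'
        · by_cases hlen : i + 3 ≤ s.length
          · have hi1 : i + 1 < s.length := by omega
            have hi2 : i + 2 < s.length := by omega
            have hd1 : s.drop (i+1) = s[i+1] :: s.drop (i+2) := List.drop_eq_getElem_cons hi1
            have hd2 : s.drop (i+2) = s[i+2] :: s.drop (i+3) := List.drop_eq_getElem_cons hi2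
            have e1 : PySem.List.slice s (some ((i:Int)+1)) (some ((i:Int)+2)) = [s[i+1]] := by
              have e := PySem.List.slice_natCast s (i+1) (i+2)
              push_cast at e
              have h1 : i + 1 - i = 1 := by omega
              rw [e, h1, hd1, List.take_succ_cons, List.take_zero]
            have e2 : PySem.List.slice s (some ((i:Int)+2)) (some ((i:Int)+3)) = [s[i+2]] := by
              have e := PySem.List.slice_natCast s (i+2) (i+3)
              push_cast at e
              have h1 : i + 1 - i = 1 := by omega
              rw [e, h1, hd2, List.take_succ_cons, List.take_zero]
            have e3 : PySem.List.slice s (some ((i:Int)+1)) (some ((i:Int)+3)) = [s[i+1], s[i+2]] := by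
              have e := PySem.List.slice_natCast s (i+1) (i+3)
              push_cast at e
              have h1 : i + 2 - i = 2 := by omega
              rw [e, h1, hd1, List.take_succ_cons, hd2, List.take_succ_cons, List.take_zero]
            have hdec : ((i : Int) < (s.length : Int) - 2) := by omega
            have hrlen : 2 ≤ (s.drop (i+1)).length := by simp; omega
            simp only [hget, e1, e2, e3, pvIsIn_singleton, hpc, hdec, decide_true,
              beq_self_eq_true, Bool.true_and, Bool.and_true, Bool.and_eq_true,
              decide_eq_true_eq,
              hd1, hd2, List.getD_cons_zero, List.getD_cons_succ, List.length_cons,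
              List.length_drop]
            by_cases m1 : pvHexSet.contains s[i+1] = true
            · by_cases m2 : pvHexSet.contains s[i+2] = true
              · rw [if_pos ⟨m1, m2⟩,
                    if_pos ⟨⟨by omega, m1⟩, m2⟩,
                    ih (i+3) _ (by omega)]
                simp only [List.take_succ_cons, List.take_zero,
                  List.drop_succ_cons, List.drop_zero, List.append_assoc,
                  List.cons_append, List.nil_append]
              · rw [if_neg (by intro hc; exact m2 hc.2),
                    if_neg (by intro hc; exact m2 hc.2), ih (i+1) _ (by omega)]
                simp only [List.append_assoc, List.cons_append, List.nil_append,
                  pvHex2, pvHexDigit]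
                norm_num
            · rw [if_neg (by intro hc; exact m1 hc.1),
                  if_neg (by intro hc; exact m1 hc.1.2), ih (i+1) _ (by omega)]
              simp only [List.append_assoc, List.cons_append, List.nil_append,
                pvHex2, pvHexDigit]
              norm_num
          · have hdec : ¬((i : Int) < (s.length : Int) - 2) := by omega
            rw [if_neg (by simp [hdec]),
                if_neg (by simp; intro _ h2 _; exact absurd h2 (by omega)),
                ih (i+1) _ (by omega)]
            simp only [List.append_assoc, List.cons_append, List.nil_append,
              pvHex2, pvHexDigit]
        · rw [if_neg (by simp [hget, hpc]), if_neg (by simp [hpc]), ih (i+1) _ (by omega)]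
          simp [List.append_assoc]
      · rw [dif_neg hi, List.drop_eq_nil_of_le (by omega), pvG]
        simp
  exact main s.length i ret (by omega)

theorem pvHex2_pct : pvHex2 37 = ['2', '5'] := by decide

theorem pvB_eq_G (cs : List Char) :
    pvEnc (cs.splitOn '%').headI ++ (((cs.splitOn '%').tail).map pvPiece).flatten = pvG cs := by
  have hPne : pvHexSet.contains '%' = false := by decide
  have scons : ∀ (c : Char) (t : List Char), (c :: t).splitOn '%' =
      if c = '%' then [] :: t.splitOn '%' else (t.splitOn '%').modifyHead (List.cons c) := by
    intro c t
    by_cases hc : c = '%' <;> simp [List.splitOn, List.splitOnP_cons, hc]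
  have sne : ∀ t : List Char, ∃ p0 rest, t.splitOn '%' = p0 :: rest := by
    intro t
    rcases h : t.splitOn '%' with _ | ⟨p0, rest⟩
    · exact absurd h (List.splitOnP_ne_nil _ _)
    · exact ⟨p0, rest, rfl⟩
  have main : ∀ (n : Nat) (cs : List Char), cs.length ≤ n →
      pvEnc (cs.splitOn '%').headI ++ (((cs.splitOn '%').tail).map pvPiece).flatten = pvG cs := by
    intro n
    induction n with
    | zero =>
      intro cs h
      have hnil : cs = [] := List.eq_nil_of_length_eq_zero (by omega)
      subst hnil
      simp [List.splitOn, pvEnc, pvG]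
    | succ n ih =>
      intro cs hlen
      cases cs with
      | nil => simp [List.splitOn, pvEnc, pvG]
      | cons c t =>
        by_cases hc : c = '%'
        · subst hc
          obtain ⟨p0, rest, hsp⟩ := sne t
          have iht := ih t (by simp only [List.length_cons] at hlen; omega)
          rw [hsp] at iht
          rw [scons, if_pos rfl, hsp, pvG]
          simp only [List.headI, List.tail_cons, List.map_cons, List.flatten_cons,
            beq_self_eq_true, Bool.true_and]
          cases t with
          | nil =>
            simp only [List.splitOn, List.splitOnP_nil, List.cons.injEq] at hsp
            obtain ⟨h1, h2⟩ := hsp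
            subst h1; subst h2
            simp [pvPiece, pvEnc, pvG, pvHex2_pct]
          | cons a t1 =>
            cases t1 with
            | nil =>
              by_cases ha : a = '%'
              · subst ha
                rw [scons '%', if_pos rfl] at hsp
                simp only [List.splitOn, List.splitOnP_nil, List.cons.injEq] at hsp
                obtain ⟨h1, h2⟩ := hsp
                subst h1; subst h2
                simp [pvPiece, pvEnc, pvG, pvHex2_pct]
              · rw [scons a, if_neg ha] at hsp
                simp only [List.splitOn, List.splitOnP_nil, List.modifyHead_cons,
                  List.cons.injEq] at hsp
                obtain ⟨h1, h2⟩ := hsp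
                subst h1; subst h2
                simp [pvPiece, pvEnc, pvG, pvHex2_pct]
            | cons b u =>
              have hu := ih u (by simp only [List.length_cons] at hlen; omega)
              by_cases hA : pvHexSet.contains a = true
              · have ha' : a ≠ '%' := by intro h; rw [h, hPne] at hA; cases hA
                by_cases hB : pvHexSet.contains b = true
                · -- %XY case: both following chars are hexdigits
                  have hb' : b ≠ '%' := by intro h; rw [h, hPne] at hB; cases hB
                  obtain ⟨q0, qr, hq⟩ := sne u
                  rw [hq] at hu
                  rw [scons a, if_neg ha', scons b, if_neg hb', hq] at hsp
                  simp only [List.modifyHead_cons] at hsp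
                  injection hsp with h1 h2
                  subst h1; subst h2
                  rw [pvPiece, if_pos (by simp; exact ⟨by simpa using hA, by simpa using hB⟩),
                      if_pos (by simp; exact ⟨by simpa using hA, by simpa using hB⟩)]
                  simp only [List.take_succ_cons, List.take_zero, List.drop_succ_cons,
                    List.drop_zero]
                  rw [← hu]
                  simp [pvEnc]
                · -- second following char is not a hexdigit
                  rw [if_neg (by simp only [Bool.and_eq_true]; intro hcon; apply hB; simpa using hcon.2)]
                  by_cases hb : b = '%'
                  · subst hb
                    rw [scons a, if_neg ha', scons '%', if_pos rfl] at hsp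
                    simp only [List.modifyHead_cons] at hsp
                    injection hsp with h1 h2
                    subst h1; subst h2
                    rw [pvPiece, if_neg (by simp)]
                    rw [← iht]
                    simp [pvEnc, pvHex2_pct]
                  · obtain ⟨q0, qr, hq⟩ := sne (b :: u)
                    rw [scons a, if_neg ha', hq] at hsp
                    simp only [List.modifyHead_cons] at hsp
                    injection hsp with h1 h2
                    subst h1; subst h2
                    have hq0 : q0.getD 0 ' ' = b := by
                      rw [scons b, if_neg hb] at hq
                      obtain ⟨r0, rr, hr⟩ := sne u
                      rw [hr] at hq
                      simp only [List.modifyHead_cons] at hq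
                      injection hq with h3 _
                      rw [← h3]
                      simp
                    rw [pvPiece, if_neg (by
                      simp only [Bool.and_eq_true, List.getD_cons_succ, hq0]
                      intro hcon
                      exact hB hcon.2)]
                    rw [← iht]
                    simp [pvEnc, pvHex2_pct]
              · -- the char after '%' is not a hexdigit
                rw [if_neg (by simp only [Bool.and_eq_true]; intro hcon; apply hA; simpa using hcon.1.2)]
                by_cases ha : a = '%'
                · subst ha
                  rw [scons '%', if_pos rfl] at hsp
                  injection hsp with h1 h2
                  subst h1; subst h2
                  rw [pvPiece, if_neg (by simp)]
                  rw [← iht]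
                  simp [pvEnc, pvHex2_pct]
                · obtain ⟨q0, qr, hq⟩ := sne (b :: u)
                  rw [scons a, if_neg ha, hq] at hsp
                  simp only [List.modifyHead_cons] at hsp
                  injection hsp with h1 h2
                  subst h1; subst h2
                  rw [pvPiece, if_neg (by
                    simp only [Bool.and_eq_true, List.getD_cons_zero]
                    intro hcon
                    exact hA hcon.1.2)]
                  rw [← iht]
                  simp [pvEnc, pvHex2_pct]
        · obtain ⟨p0, rest, hsp⟩ := sne t
          have iht := ih t (by simp only [List.length_cons] at hlen; omega)
          rw [hsp] at iht
          rw [scons, if_neg hc, hsp, List.modifyHead_cons, pvG]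
          rw [if_neg (by simp [hc])]
          rw [← iht]
          simp only [List.headI, List.tail_cons, pvEnc, List.flatMap_cons,
            List.append_assoc, List.cons_append]
  exact main cs.length cs le_rfl

-- ===== VERDICT (by name: the statement is the Claim_ definition above) =====
theorem double_url_encode_spec : Claim_equal_double_url_encode := by
  intro payload _
  unfold Spec_double_url_encode double_url_encode double_url_encode_alt
  by_cases h : payload.toList = []
  · simp [h]
  · simp only [h, ite_false]
    rw [pvA_eq_G, ← pvB_eq_G]
    simp
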